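-- pv_equiv track=rewrite | github.com/chanakyavasantha/gitmind | core/diff_reader.py | _is_noise
-- ===== SOURCE A (Python) =====
-- _NOISE_PREFIXES = (
--     "venv/",
--     ".venv/",
--     "env/",
--     ".env/",
--     ".gitmind/venv/",
--     "node_modules/",
--     "__pycache__/",
--     ".mypy_cache/",
--     ".pytest_cache/",
--     ".tox/",
--     "dist/",
--     "build/",
--     ".eggs/",
--     "*.egg-info/",
-- )
--
-- _NOISE_SUFFIXES = (".pyc", ".pyo", ".pyd")
--
-- def _is_noise(path: str) -> bool:
--     for prefix in _NOISE_PREFIXES: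
--         if path.startswith(prefix) or ("/" + prefix) in ("/" + path):
--             return True
--     for suffix in _NOISE_SUFFIXES:
--         if path.endswith(suffix):
--             return True
--     return False
-- ===== SOURCE B (Python) =====
-- _NOISE_PREFIXES = (
--     "venv/",
--     ".venv/",
--     "env/",
--     ".env/",
--     ".gitmind/venv/",
--     "node_modules/",
--     "__pycache__/",
--     ".mypy_cache/",
--     ".pytest_cache/",
--     ".tox/",
--     "dist/",
--     "build/",
--     ".eggs/",
--     "*.egg-info/",
-- )
--
-- _NOISE_SUFFIXES = (".pyc", ".pyo", ".pyd")
--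
-- def _is_noise(path: str) -> bool:
--     # One pass collects every segment-start tail (start of path, or just after a '/');
--     # a noisy prefix matches iff it starts some tail.
--     tails = [path[i + 1:] for i, c in enumerate(path) if c == "/"] + [path]
--     return any(t.startswith(p) for t in tails for p in _NOISE_PREFIXES) \
--         or path.endswith(_NOISE_SUFFIXES)
-- ===== Notes on version B (the rewrite author's own statement) =====
-- stated objective: alternative
-- what changed: Instead of running a separate slash-anchored substring search over the slash-anchored path for each of the 14 prefixes, B collects the segment-start tails of the path once and tests each prefix with plain startswith against those tails (plus one tuple endswith for the suffixes).
import Mathlib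
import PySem

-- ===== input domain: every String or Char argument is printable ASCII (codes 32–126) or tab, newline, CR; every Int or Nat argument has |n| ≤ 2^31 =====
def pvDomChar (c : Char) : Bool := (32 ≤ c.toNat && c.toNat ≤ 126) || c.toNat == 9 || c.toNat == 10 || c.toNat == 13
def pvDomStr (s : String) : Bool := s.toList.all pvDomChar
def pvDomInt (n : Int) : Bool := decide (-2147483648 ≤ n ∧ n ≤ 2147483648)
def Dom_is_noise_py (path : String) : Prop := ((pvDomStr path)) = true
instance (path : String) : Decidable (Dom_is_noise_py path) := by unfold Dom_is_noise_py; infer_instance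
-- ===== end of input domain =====

-- B replaces A's per-prefix substring search of '/'+prefix in '/'+path by collecting the
-- segment-start tails of path once and testing prefixes with plain startswith (objective: alternative).

-- ===== PORT A =====
def noisePrefixes : List String :=
  ["venv/", ".venv/", "env/", ".env/", ".gitmind/venv/", "node_modules/",
   "__pycache__/", ".mypy_cache/", ".pytest_cache/", ".tox/", "dist/",
   "build/", ".eggs/", "*.egg-info/"]

def noiseSuffixes : List String := [".pyc", ".pyo", ".pyd"]

-- "/" + prefix and "/" + path are ported exactly as char-level cons on the toList views.
def is_noise_py (path : String) : Bool :=
  (noisePrefixes.any (fun pre =>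
     PySem.Chars.startswith path.toList pre.toList ||
     PySem.Chars.isIn ('/' :: pre.toList) ('/' :: path.toList))) ||
  (noiseSuffixes.any (fun suf => PySem.Chars.endswith path.toList suf.toList))

-- ===== PORT B =====
-- tails = [path[i+1:] for i, c in enumerate(path) if c == "/"] + [path]
def bTails (s : List Char) : List (List Char) :=
  (((PySem.List.enumerate s 0).filter (fun ic => ic.2 == '/')).map
     (fun ic => PySem.List.slice s (some (ic.1 + 1)) none)) ++ [s]

def is_noise_py_alt (path : String) : Bool :=
  let s := path.toList
  ((bTails s).any (fun t =>
     noisePrefixes.any (fun pre => PySem.Chars.startswith t pre.toList))) ||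
  (noiseSuffixes.any (fun suf => PySem.Chars.endswith s suf.toList))

-- ===== PRECONDITION & SPEC =====
def Spec_is_noise_py (path : String) (out : Bool) : Prop := out = is_noise_py_alt path
instance (path : String) (out : Bool) : Decidable (Spec_is_noise_py path out) := by unfold Spec_is_noise_py; infer_instance

-- ===== CLAIM (what is proved, stated in full; the proofs are below) =====
def Claim_equal_is_noise_py : Prop := ∀ (path : String), Dom_is_noise_py path → Spec_is_noise_py path (is_noise_py path)

-- ===== LEMMAS AND PROOFS =====

-- membership in B's tail list
theorem mem_bTails_iff (s t : List Char) :
    t ∈ bTails s ↔ (∃ k, ∃ _ : k < s.length, s[k] = '/' ∧ t = s.drop (k + 1)) ∨ t = s := by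
  unfold bTails
  simp only [List.mem_append, List.mem_singleton, List.mem_map, List.mem_filter,
    PySem.List.mem_enumerate_iff]
  constructor
  · rintro (⟨ic, ⟨⟨k, hk, rfl⟩, hc⟩, rfl⟩ | rfl)
    · left
      refine ⟨k, hk, by simpa using hc, ?_⟩
      have : ((0 : Int) + k) + 1 = ((k + 1 : Nat) : Int) := by push_cast; ring
      rw [this, PySem.List.slice_from_natCast]
    · right; rfl
  · rintro (⟨k, hk, hc, rfl⟩ | rfl)
    · left
      refine ⟨((0 : Int) + k, s[k]), ⟨⟨k, hk, rfl⟩, by simpa using hc⟩, ?_⟩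
      have : ((0 : Int) + k) + 1 = ((k + 1 : Nat) : Int) := by push_cast; ring
      rw [this, PySem.List.slice_from_natCast]
    · right; rfl

-- A's substring test of '/'+cs in '/'+s finds cs exactly at the start or right after a '/'
theorem isIn_slash_iff (s cs : List Char) :
    PySem.Chars.isIn ('/' :: cs) ('/' :: s) = true ↔
      cs <+: s ∨ ∃ k, ∃ _ : k < s.length, s[k] = '/' ∧ cs <+: s.drop (k + 1) := by
  rw [← PySem.Chars.exists_prefix_drop_iff_isIn]
  constructor
  · rintro ⟨j, hj⟩
    cases j with
    | zero =>
      left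
      simpa [List.cons_prefix_cons] using hj
    | succ k =>
      rw [List.drop_succ_cons] at hj
      by_cases hk : k < s.length
      · right
        rw [List.drop_eq_getElem_cons hk, List.cons_prefix_cons] at hj
        exact ⟨k, hk, hj.1.symm, hj.2⟩
      · exfalso
        rw [List.drop_eq_nil_of_le (by omega)] at hj
        exact absurd (List.eq_nil_of_prefix_nil hj) (by simp)
  · rintro (h | ⟨k, hk, hc, h⟩)
    · exact ⟨0, by simpa [List.cons_prefix_cons] using h⟩
    · refine ⟨k + 1, ?_⟩
      rw [List.drop_succ_cons, List.drop_eq_getElem_cons hk, hc, List.cons_prefix_cons]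
      exact ⟨rfl, h⟩

-- per-prefix: A's (startswith || substring) test equals B's "starts some tail"
theorem prefix_case (s cs : List Char) :
    (PySem.Chars.startswith s cs || PySem.Chars.isIn ('/' :: cs) ('/' :: s)) =
      (bTails s).any (fun t => PySem.Chars.startswith t cs) := by
  rw [Bool.eq_iff_iff]
  simp only [Bool.or_eq_true, List.any_eq_true, PySem.Chars.startswith_iff,
    isIn_slash_iff]
  constructor
  · rintro (h | h | ⟨k, hk, hc, h⟩)
    · exact ⟨s, (mem_bTails_iff s s).2 (Or.inr rfl), h⟩
    · exact ⟨s, (mem_bTails_iff s s).2 (Or.inr rfl), h⟩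
    · exact ⟨s.drop (k + 1), (mem_bTails_iff _ _).2 (Or.inl ⟨k, hk, hc, rfl⟩), h⟩
  · rintro ⟨t, ht, hp⟩
    rcases (mem_bTails_iff s t).1 ht with ⟨k, hk, hc, rfl⟩ | rfl
    · exact Or.inr (Or.inr ⟨k, hk, hc, hp⟩)
    · exact Or.inl hp

-- swap the two bounded quantifiers (B iterates tails outermost, A iterates prefixes)
theorem any_swap {α β : Type} (l : List α) (m : List β) (f : α → β → Bool) :
    (l.any fun a => m.any fun b => f a b) = (m.any fun b => l.any fun a => f a b) := by
  rw [Bool.eq_iff_iff]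
  simp only [List.any_eq_true]
  exact ⟨fun ⟨a, ha, b, hb, h⟩ => ⟨b, hb, a, ha, h⟩,
         fun ⟨b, hb, a, ha, h⟩ => ⟨a, ha, b, hb, h⟩⟩

-- pointwise congruence for any
theorem any_ext {α : Type} (l : List α) (f g : α → Bool) (h : ∀ a ∈ l, f a = g a) :
    l.any f = l.any g := by
  induction l with
  | nil => rfl
  | cons a l ih =>
    simp only [List.any_cons, h a (by simp), ih (fun x hx => h x (by simp [hx]))]

-- ===== VERDICT (by name: the statement is the Claim_ definition above) =====
theorem is_noise_py_spec : Claim_equal_is_noise_py := by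
  intro path _
  unfold Spec_is_noise_py is_noise_py is_noise_py_alt
  show _ = (((bTails path.toList).any fun t =>
      noisePrefixes.any fun pre => PySem.Chars.startswith t pre.toList) ||
    (noiseSuffixes.any fun suf => PySem.Chars.endswith path.toList suf.toList))
  rw [any_swap (bTails path.toList) noisePrefixes
      (fun t pre => PySem.Chars.startswith t pre.toList)]
  have h : (noisePrefixes.any fun pre =>
        PySem.Chars.startswith path.toList pre.toList ||
        PySem.Chars.isIn ('/' :: pre.toList) ('/' :: path.toList)) =
      (noisePrefixes.any fun pre =>
        (bTails path.toList).any fun t => PySem.Chars.startswith t pre.toList) :=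
    any_ext noisePrefixes _ _ (fun pre _ => prefix_case path.toList pre.toList)
  rw [h]
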